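-- pv_equiv track=rewrite | github.com/rangogamedev/codecks-cli | codecks_cli/planning.py | append_table_row
-- ===== SOURCE A (Python) =====
-- def append_table_row(content: str, header_pattern: str, row: str) -> str:
--     """Append a row to a markdown table identified by a header cell pattern.
--
--     Finds the table whose header line contains header_pattern, then inserts
--     the new row after the last existing data row (or after the separator
--     if the table is empty).
--     """
--     lines = content.splitlines(keepends=True)
--     header_idx = None
--     for i, line in enumerate(lines):
--         if header_pattern in line and line.strip().startswith("|"):
--             header_idx = i
--             break
--     if header_idx is None:
--         return content
--
--     # Separator is the line right after header
--     sep_idx = header_idx + 1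
--
--     # Walk past existing data rows
--     insert_idx = sep_idx + 1
--     while insert_idx < len(lines) and lines[insert_idx].strip().startswith("|"):
--         insert_idx += 1
--
--     lines.insert(insert_idx, row + "\n")
--     return "".join(lines)
-- ===== SOURCE B (Python) =====
-- def _is_table_line(line):
--     return line.strip().startswith("|")
--
--
-- def _span_rows(lines):
--     """Split into (leading table-row lines, remaining lines)."""
--     rows = []
--     rest = list(lines)
--     while rest and _is_table_line(rest[0]):
--         rows.append(rest.pop(0))
--     return rows, rest
--
--
-- def _go(lines, header_pattern, row):
--     """Recursively copy lines; at the first header line splice the row in."""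
--     if not lines:
--         return []
--     head, tail = lines[0], lines[1:]
--     if header_pattern in head and _is_table_line(head):
--         sep, body = tail[:1], tail[1:]
--         rows, rest = _span_rows(body)
--         return [head] + sep + rows + [row + "\n"] + rest
--     return [head] + _go(tail, header_pattern, row)
--
--
-- def append_table_row(content: str, header_pattern: str, row: str) -> str:
--     return "".join(_go(content.splitlines(keepends=True), header_pattern, row))
-- ===== Notes on version B (the rewrite author's own statement) =====
-- stated objective: alternative
-- what changed: Replaces A's find-header-index / advance-an-insert-index-in-a-while-loop / list.insert scheme by a single forward recursion over the lines that, at the first header line, splices in the separator, the leading table rows (a takewhile-style span) and the new row, copying everything else verbatim.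
import Mathlib
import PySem

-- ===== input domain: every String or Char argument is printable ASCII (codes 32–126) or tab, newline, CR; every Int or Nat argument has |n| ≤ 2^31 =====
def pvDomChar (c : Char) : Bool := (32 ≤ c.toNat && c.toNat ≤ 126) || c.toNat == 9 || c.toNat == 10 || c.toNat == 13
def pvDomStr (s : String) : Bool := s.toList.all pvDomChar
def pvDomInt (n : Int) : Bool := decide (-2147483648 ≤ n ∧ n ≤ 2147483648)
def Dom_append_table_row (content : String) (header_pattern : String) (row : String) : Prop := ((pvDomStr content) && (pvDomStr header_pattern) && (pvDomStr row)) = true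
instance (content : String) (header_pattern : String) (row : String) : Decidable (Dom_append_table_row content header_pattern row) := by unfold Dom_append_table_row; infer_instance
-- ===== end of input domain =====

-- B is a simpler single forward recursion that splices the row in at the first header
-- (vs A's find-index / walk-index / list.insert); same cost, proved equal on all inputs.

-- shared helper: Python's str.splitlines(keepends=True) (exact on \n, \r, \r\n — the
-- only line terminators in Dom); both Pythons call this same builtin
def splitKeep : List Char → List Char → List (List Char)
  | [], acc => if acc = [] then [] else [acc.reverse]
  | '\r' :: '\n' :: rest, acc => (acc.reverse ++ ['\r', '\n']) :: splitKeep rest []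
  | '\n' :: rest, acc => (acc.reverse ++ ['\n']) :: splitKeep rest []
  | '\r' :: rest, acc => (acc.reverse ++ ['\r']) :: splitKeep rest []
  | c :: rest, acc => splitKeep rest (c :: acc)

-- line.strip().startswith("|") (shared: both Pythons test lines this way)
def isTableLine (l : List Char) : Bool := PySem.Chars.startswith (PySem.Chars.strip l) ['|']

-- ===== PORT A =====
-- the enumerate-search for header_idx
def findHeaderAux (pat : List Char) : List (List Char) → Nat → Option Nat
  | [], _ => none
  | l :: rest, i =>
      if PySem.Chars.isIn pat l && isTableLine l then some i
      else findHeaderAux pat rest (i + 1)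

-- the 'while insert_idx < len(lines) and …: insert_idx += 1' walk
def walkIdx (lines : List (List Char)) (i : Nat) : Nat :=
  if h : i < lines.length then
    if isTableLine lines[i] then walkIdx lines (i + 1) else i
  else i
termination_by lines.length - i

def append_table_row (content : String) (header_pattern : String) (row : String) : String :=
  let lines := splitKeep content.toList []
  match findHeaderAux header_pattern.toList lines 0 with
  | none => content
  | some headerIdx =>
      let sepIdx := headerIdx + 1
      let insertIdx := walkIdx lines (sepIdx + 1)
      String.ofList (PySem.List.insert lines (insertIdx : Int) (row.toList ++ ['\n'])).flatten

-- ===== PORT B =====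
-- _span_rows: (leading table-row lines, rest)
def spanRows : List (List Char) → List (List Char) × List (List Char)
  | [] => ([], [])
  | l :: rest =>
      if isTableLine l then
        let (a, b) := spanRows rest
        (l :: a, b)
      else ([], l :: rest)

-- _go: copy lines, splice the row in at the first header line
def goB (pat row : List Char) : List (List Char) → List (List Char)
  | [] => []
  | head :: tail =>
      if PySem.Chars.isIn pat head && isTableLine head then
        let sep := tail.take 1
        let body := tail.drop 1
        let rowsRest := spanRows body
        head :: (sep ++ rowsRest.1 ++ [row ++ ['\n']] ++ rowsRest.2)
      else head :: goB pat row tail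

def append_table_row_alt (content : String) (header_pattern : String) (row : String) : String :=
  String.ofList (goB header_pattern.toList row.toList (splitKeep content.toList [])).flatten

-- ===== PRECONDITION & SPEC =====
def Spec_append_table_row (content : String) (header_pattern : String) (row : String) (out : String) : Prop := out = append_table_row_alt content header_pattern row
instance (content : String) (header_pattern : String) (row : String) (out : String) : Decidable (Spec_append_table_row content header_pattern row out) := by unfold Spec_append_table_row; infer_instance

-- ===== CLAIM (what is proved, stated in full; the proofs are below) =====
def Claim_equal_append_table_row : Prop := ∀ (content : String) (header_pattern : String) (row : String), Dom_append_table_row content header_pattern row → Spec_append_table_row content header_pattern row (append_table_row content header_pattern row)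

-- ===== LEMMAS AND PROOFS =====

-- splitlines(keepends=True) rejoins to the original string
theorem flatten_splitKeep (s acc : List Char) :
    (splitKeep s acc).flatten = acc.reverse ++ s := by
  fun_induction splitKeep s acc <;> simp_all

theorem take_tw {α : Type} (p : α → Bool) (l : List α) :
    l.take (l.takeWhile p).length = l.takeWhile p := by
  induction l with
  | nil => rfl
  | cons a t ih => by_cases h : p a <;> simp [h, ih]

theorem drop_tw {α : Type} (p : α → Bool) (l : List α) :
    l.drop (l.takeWhile p).length = l.dropWhile p := by
  induction l with
  | nil => rfl
  | cons a t ih => by_cases h : p a <;> simp [h, ih]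

-- spanRows = (takeWhile, dropWhile)
theorem spanRows_spec (ls : List (List Char)) :
    spanRows ls = (ls.takeWhile isTableLine, ls.dropWhile isTableLine) := by
  induction ls with
  | nil => rfl
  | cons l rest ih => by_cases h : isTableLine l = true <;> simp [spanRows, h, ih]

-- walkIdx shifts under cons
theorem walkIdx_cons (l : List Char) (lines : List (List Char)) (i : Nat) :
    walkIdx (l :: lines) (i + 1) = walkIdx lines i + 1 := by
  fun_induction walkIdx lines i with
  | case1 i h ht ih =>
      rw [walkIdx]
      simp only [List.length_cons]
      rw [dif_pos (by omega)]
      simp only [List.getElem_cons_succ]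
      rw [if_pos ht, ih]
  | case2 i h ht =>
      rw [walkIdx]
      simp only [List.length_cons]
      rw [dif_pos (by omega)]
      simp only [List.getElem_cons_succ]
      rw [if_neg ht]
  | case3 i h =>
      rw [walkIdx, dif_neg (by simp; omega)]

-- walkIdx from 0 counts the leading table lines
theorem walkIdx_zero (lines : List (List Char)) :
    walkIdx lines 0 = (lines.takeWhile isTableLine).length := by
  induction lines with
  | nil => rw [walkIdx]; simp
  | cons l rest ih =>
      by_cases h : isTableLine l = true
      · rw [walkIdx]
        simp only [List.length_cons]
        rw [dif_pos (by omega)]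
        simp only [List.getElem_cons_zero]
        rw [if_pos h, walkIdx_cons, ih]
        simp [h]
      · rw [walkIdx]
        simp only [List.length_cons]
        rw [dif_pos (by omega)]
        simp only [List.getElem_cons_zero]
        rw [if_neg h]
        simp [h]

-- Python list.insert at a nonnegative (possibly overflowing) index
theorem insert_natCast {α : Type} (xs : List α) (n : Nat) (v : α) :
    PySem.List.insert xs (n : Int) v = xs.take n ++ v :: xs.drop n := by
  simp only [PySem.List.insert, PySem.List.sliceIndices]
  norm_num
  split_ifs with hneg
  · exact absurd hneg (by omega)
  · rw [show ((min (n : Int) (xs.length : Int))).toNat = min n xs.length from by omega]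
    rcases Nat.le_total n xs.length with h | h
    · rw [Nat.min_eq_left h]
    · rw [Nat.min_eq_right h, List.take_length, List.take_of_length_le h,
        List.drop_length, List.drop_of_length_le h]

-- findHeaderAux shifts its counter
theorem findHeaderAux_shift (pat : List Char) (ls : List (List Char)) (i : Nat) :
    findHeaderAux pat ls i = (findHeaderAux pat ls 0).map (· + i) := by
  induction ls generalizing i with
  | nil => rfl
  | cons l rest ih =>
      by_cases h : (PySem.Chars.isIn pat l && isTableLine l) = true
      · simp [findHeaderAux, h]
      · rw [findHeaderAux, if_neg h, findHeaderAux, if_neg h, ih (i + 1), ih 1,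
          Option.map_map]
        cases findHeaderAux pat rest 0 <;> simp <;> omega

-- the core list-level equivalence
theorem core (pat row : List Char) (lines : List (List Char)) :
    (match findHeaderAux pat lines 0 with
      | none => lines
      | some hi =>
          PySem.List.insert lines ((walkIdx lines (hi + 2) : Nat) : Int) (row ++ ['\n'])) =
    goB pat row lines := by
  induction lines with
  | nil => rfl
  | cons head tail ih =>
      by_cases h : (PySem.Chars.isIn pat head && isTableLine head) = true
      · -- header found at index 0
        rw [findHeaderAux, if_pos h]
        show PySem.List.insert (head :: tail)
            ((walkIdx (head :: tail) (0 + 2) : Nat) : Int) (row ++ ['\n']) =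
          goB pat row (head :: tail)
        have hw : walkIdx (head :: tail) (0 + 2) =
            ((tail.drop 1).takeWhile isTableLine).length + 2 := by
          cases tail with
          | nil => rw [show (0+2 : Nat) = 2 from rfl, walkIdx]; simp
          | cons s body =>
              rw [show (0+2 : Nat) = 1 + 1 from rfl, walkIdx_cons,
                show (1 : Nat) = 0 + 1 from rfl, walkIdx_cons, walkIdx_zero]
              simp
        rw [hw, insert_natCast, goB, if_pos h]
        show _ = head :: (List.take 1 tail ++ (spanRows (List.drop 1 tail)).1 ++
            [row ++ ['\n']] ++ (spanRows (List.drop 1 tail)).2)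
        rw [spanRows_spec]
        cases tail with
        | nil => simp
        | cons s body =>
            simp only [List.drop_succ_cons, List.drop_zero, List.take_succ_cons,
              List.take_zero]
            rw [take_tw, drop_tw]
            simp
      · have hA : findHeaderAux pat (head :: tail) 0 =
            (findHeaderAux pat tail 0).map (· + 1) := by
          rw [findHeaderAux, if_neg h]
          exact findHeaderAux_shift pat tail 1
        have hB : goB pat row (head :: tail) = head :: goB pat row tail := by
          rw [goB, if_neg h]
        rw [hB, hA]
        cases hf : findHeaderAux pat tail 0 with
        | none =>
            rw [hf] at ih
            exact congrArg (List.cons head) ih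
        | some hi =>
            rw [hf] at ih
            have ih' : PySem.List.insert tail
                ((walkIdx tail (hi + 2) : Nat) : Int) (row ++ ['\n']) =
                goB pat row tail := ih
            simp only [Option.map_some]
            show PySem.List.insert (head :: tail)
                ((walkIdx (head :: tail) (hi + 1 + 2) : Nat) : Int) (row ++ ['\n']) =
              head :: goB pat row tail
            rw [← ih', show hi + 1 + 2 = (hi + 2) + 1 from by omega, walkIdx_cons,
              insert_natCast, insert_natCast]
            simp

-- ===== VERDICT (by name: the statement is the Claim_ definition above) =====
theorem append_table_row_spec : Claim_equal_append_table_row := by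
  intro content header_pattern row _
  unfold Spec_append_table_row append_table_row append_table_row_alt
  rw [← core header_pattern.toList row.toList (splitKeep content.toList [])]
  cases hf : findHeaderAux header_pattern.toList (splitKeep content.toList []) 0 with
  | none =>
      simp only [hf, flatten_splitKeep, List.reverse_nil, List.nil_append]
      exact String.ofList_toList.symm
  | some hi => simp [hf]
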